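-- pv_equiv track=rewrite | github.com/rotweinur/Practise_15 | task_12.py | search
-- ===== SOURCE A (Python) =====
-- def search(a: list, x: int) -> int:
--     """Return 1 if integer x is in the list a, otherwise return 0.
--
--     :param a: list of integers
--     :param x: integer to search for
--     :return: 1 if x is found, 0 otherwise
--     :raises TypeError: if a is not a list or contains non-integers
--     """
--     if not isinstance(a, list):
--         raise TypeError("a must be a list")
--     for num in a:
--         if not isinstance(num, int):
--             raise TypeError("all elements of the list must be integers")
--     if not isinstance(x, int):
--         raise TypeError("x must be an integer")
--
--     if len(a) == 0:
--         return 0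
--
--     if a[0] == x:
--         return 1
--
--     return search(a[1:], x)
-- ===== SOURCE B (Python) =====
-- def search(a: list, x: int) -> int:
--     """Return 1 if integer x is in the list a, otherwise return 0."""
--     if not isinstance(a, list):
--         raise TypeError("a must be a list")
--     for num in a:
--         if not isinstance(num, int):
--             raise TypeError("all elements of the list must be integers")
--     if not isinstance(x, int):
--         raise TypeError("x must be an integer")
--
--     found = 0
--     for num in a:
--         if found == 0 and num == x:
--             found = 1
--     return found
-- ===== Notes on version B (the rewrite author's own statement) =====
-- stated objective: simpler
-- what changed: Replaced the O(n^2) recursion over list slices with a single iterative linear pass keeping a found flag (validation unchanged to preserve exception order).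
import Mathlib
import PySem

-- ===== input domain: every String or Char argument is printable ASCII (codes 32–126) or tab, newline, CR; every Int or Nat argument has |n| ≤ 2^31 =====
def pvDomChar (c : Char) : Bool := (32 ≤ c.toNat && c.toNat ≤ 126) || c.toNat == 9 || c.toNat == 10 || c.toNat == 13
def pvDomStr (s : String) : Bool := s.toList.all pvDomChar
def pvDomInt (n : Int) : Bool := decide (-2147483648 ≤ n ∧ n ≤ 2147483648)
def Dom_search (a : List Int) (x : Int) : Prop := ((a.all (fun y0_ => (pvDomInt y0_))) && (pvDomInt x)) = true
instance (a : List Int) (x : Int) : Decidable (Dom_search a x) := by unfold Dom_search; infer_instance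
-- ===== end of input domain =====

-- B replaces A's recursion over list slices by one linear pass with a found flag (simpler, O(n) vs O(n^2)).
-- The Python type-validation loops raise only on inputs outside the typed domain and vanish under the convention.

-- ===== PORT A =====
-- A: empty → 0; head == x → 1; else recurse on a[1:] (the slice is the tail here).
def search (a : List Int) (x : Int) : Int :=
  match a with
  | [] => 0
  | h :: t => if h = x then 1 else search t x

-- ===== PORT B =====
-- B: fold over a keeping the flag 'found', set to 1 at the first element equal to x.
def search_alt (a : List Int) (x : Int) : Int :=
  a.foldl (fun found num => if found = 0 ∧ num = x then 1 else found) 0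

-- ===== PRECONDITION & SPEC =====
def Spec_search (a : List Int) (x : Int) (out : Int) : Prop := out = search_alt a x
instance (a : List Int) (x : Int) (out : Int) : Decidable (Spec_search a x out) := by unfold Spec_search; infer_instance

-- ===== CLAIM (what is proved, stated in full; the proofs are below) =====
def Claim_equal_search : Prop := ∀ (a : List Int) (x : Int), Dom_search a x → Spec_search a x (search a x)

-- ===== LEMMAS AND PROOFS =====
-- once the flag is 1, the fold keeps it 1
theorem foldl_flag_one (a : List Int) (x : Int) :
    a.foldl (fun found num => if found = 0 ∧ num = x then (1:Int) else found) 1 = 1 := by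
  induction a with
  | nil => rfl
  | cons h t ih => simpa using ih

theorem search_eq_alt (a : List Int) (x : Int) : search a x = search_alt a x := by
  induction a with
  | nil => rfl
  | cons h t ih =>
    simp only [search, search_alt, List.foldl]
    by_cases hx : h = x
    · simp [hx, foldl_flag_one]
    · simpa [hx, search_alt] using ih

-- ===== VERDICT (by name: the statement is the Claim_ definition above) =====
theorem search_spec : Claim_equal_search := by
  intro a x _
  exact search_eq_alt a x
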